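-- pv_equiv track=rewrite | github.com/skymygo/coding_test | programmers/monthly_code_challenge_s1/2105/q2.py | solution
-- ===== SOURCE A (Python) =====
-- def solution(numbers):
--     answer = []
--     for number in numbers:
--         number_str = bin(number)[2:]
--         if "0" in number_str:
--             zero_pos = (len(number_str) - number_str[::-1].index("0")) -1
--             new_number_str = number_str[:zero_pos] + "1"
--             if zero_pos < len(number_str)-1:
--                 new_number_str += "0" + number_str[zero_pos+2:]
--             number_str = new_number_str
--         else:
--             number_str = "10"+ number_str[1:]
--         answer.append(int("0b"+number_str, 2))
--
--     return answer
-- ===== SOURCE B (Python) =====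
-- def solution(numbers):
--     answer = []
--     for number in numbers:
--         p = 0
--         while (number >> p) & 1:
--             p += 1
--         answer.append(number + (1 << p if p == 0 else 1 << (p - 1)))
--     return answer
-- ===== Notes on version B (the rewrite author's own statement) =====
-- stated objective: idiomatic
-- what changed: replaces A's binary-string surgery (bin()[2:], reversed-string index, slice concatenation, int(...,2) re-parse) with a direct integer bit scan: find the lowest clear bit p and add 1<<p (p=0) or 1<<(p-1) (p>0)
-- outside the precondition, e.g. on solution([-1]): A returns [5], B does not finish within the time limit; on solution([-3]): A returns [11], B returns [-2]; on solution([-2]): A raises ValueError, B returns [-1]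
import Mathlib
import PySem

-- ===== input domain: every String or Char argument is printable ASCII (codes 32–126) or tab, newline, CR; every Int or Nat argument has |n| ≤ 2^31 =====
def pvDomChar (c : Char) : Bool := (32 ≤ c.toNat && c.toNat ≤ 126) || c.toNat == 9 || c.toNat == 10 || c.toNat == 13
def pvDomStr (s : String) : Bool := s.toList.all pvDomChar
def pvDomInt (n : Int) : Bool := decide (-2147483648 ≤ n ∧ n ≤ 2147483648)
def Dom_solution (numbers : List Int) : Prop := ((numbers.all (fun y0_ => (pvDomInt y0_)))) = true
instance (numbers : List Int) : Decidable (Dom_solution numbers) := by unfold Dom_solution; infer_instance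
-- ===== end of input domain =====

-- B replaces A's binary-string surgery with an integer bit scan (same values on all non-negative inputs).

-- ===== PORT A =====
-- int(t, 2) hand-ported for the strings A builds under Pre_: t = "0b" + a non-empty string of
-- '0'/'1' digits (exact there; on any other string Python's int() raises and Pre_ excludes the input).
def pvIntBase2 (cs : List Char) : Int :=
  match cs with
  | '0' :: 'b' :: ds => ds.foldl (fun acc c => 2 * acc + (if c = '1' then 1 else 0)) 0
  | _ => 0

-- A's loop body: bin(number) is PySem.Int.toBinChars0b, [::-1] is slice?, and number_str[::-1].index("0")
-- is Chars.find (equal to .index on the guarded branch, where "0" does occur).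
def pvStepA (number : Int) : Int :=
  let numberStr := PySem.List.slice (PySem.Int.toBinChars0b number) (some 2) none         -- bin(number)[2:]
  let numberStr2 :=
    if PySem.Chars.isIn ['0'] numberStr then                                              -- "0" in number_str
      let rev := (PySem.List.slice? numberStr none none (-1)).getD []                     -- number_str[::-1]
      let zeroPos : Int := (PySem.List.len numberStr - PySem.Chars.find rev ['0']) - 1
      let newNumberStr := PySem.List.slice numberStr none (some zeroPos) ++ ['1']         -- number_str[:zero_pos] + "1"
      if zeroPos < PySem.List.len numberStr - 1 then
        newNumberStr ++ '0' :: PySem.List.slice numberStr (some (zeroPos + 2)) none       -- += "0" + number_str[zero_pos+2:]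
      else newNumberStr
    else '1' :: '0' :: PySem.List.slice numberStr (some 1) none                           -- "10" + number_str[1:]
  pvIntBase2 ('0' :: 'b' :: numberStr2)                                                   -- int("0b"+number_str, 2)

def solution (numbers : List Int) : List Int :=
  numbers.foldl (fun answer number => answer ++ [pvStepA number]) []

-- ===== PORT B =====
-- while (number >> p) & 1: p += 1   — fuel |number|+2 exceeds the loop's trip count whenever
-- the Python loop terminates at all (under Pre_ it always does)
def pvScanClear (number : Int) (p : Nat) (fuel : Nat) : Nat :=
  match fuel with
  | 0 => p
  | fuel + 1 => if PySem.Int.band (number >>> p) 1 = 1 then pvScanClear number (p + 1) fuel else p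

def pvStepB (number : Int) : Int :=
  let p := pvScanClear number 0 (number.natAbs + 2)
  number + (if p = 0 then (1 : Int) <<< p else (1 : Int) <<< (p - 1))

def solution_alt (numbers : List Int) : List Int :=
  numbers.foldl (fun answer number => answer ++ [pvStepB number]) []

-- ===== PRECONDITION & SPEC =====
-- Pre_ excludes lists containing a negative number: there A's bin(number)[2:] slicing leaves a stray
-- 'b', so A either raises ValueError or returns string-mangling garbage (e.g. [5] for [-1]), while B
-- scans the two's-complement bits and returns a different value or (e.g. for -1) never terminates.
def Pre_solution (numbers : List Int) : Prop := ∀ n ∈ numbers, 0 ≤ n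
instance (numbers : List Int) : Decidable (Pre_solution numbers) := by unfold Pre_solution; infer_instance

def pvWitness_solution : List Int := [6, 2, 0, 3, 11]

def Spec_solution (numbers : List Int) (out : List Int) : Prop := out = solution_alt numbers
instance (numbers : List Int) (out : List Int) : Decidable (Spec_solution numbers out) := by unfold Spec_solution; infer_instance

-- ===== CLAIM (what is proved, stated in full; the proofs are below) =====
def Claim_equal_solution : Prop := ∀ (numbers : List Int), Dom_solution numbers → Pre_solution numbers → Spec_solution numbers (solution numbers)

-- ===== LEMMAS AND PROOFS =====

-- value of a little-endian (LSB-first) list of binary digit characters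
def pvRv : List Char → Int
  | [] => 0
  | c :: r => (if c = '1' then 1 else 0) + 2 * pvRv r

-- index of the lowest clear bit of a natural number
def pvLcb (m : Nat) : Nat :=
  if _h : m % 2 = 0 then 0 else pvLcb (m / 2) + 1
termination_by m
decreasing_by omega

lemma pvRv_append (xs ys : List Char) :
    pvRv (xs ++ ys) = pvRv xs + 2 ^ xs.length * pvRv ys := by
  induction xs with
  | nil => simp [pvRv]
  | cons c t ih => simp [pvRv, ih, pow_succ]; ring

lemma pvRv_replicate_one (j : Nat) : pvRv (List.replicate j '1') = 2 ^ j - 1 := by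
  induction j with
  | zero => simp [pvRv]
  | succ k ih => simp [List.replicate_succ, pvRv, ih, pow_succ]; ring

lemma pvIntBase2_eq_pvRv (ds : List Char) :
    pvIntBase2 ('0' :: 'b' :: ds) = pvRv ds.reverse := by
  have aux : ∀ (t : List Char) (a : Int),
      t.foldl (fun acc c => 2 * acc + (if c = '1' then 1 else 0)) a
        = a * 2 ^ t.length + pvRv t.reverse := by
    intro t
    induction t with
    | nil => intro a; simp [pvRv]
    | cons c t ih =>
      intro a
      simp only [List.foldl_cons, ih, List.reverse_cons, pvRv_append, List.length_cons, pvRv, List.length_reverse]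
      ring
  simp [pvIntBase2, aux]

-- ---- facts about Nat.toDigits 2 ----

lemma pvT_zero : Nat.toDigits 2 0 = ['0'] := by decide

lemma pvT_one : Nat.toDigits 2 1 = ['1'] := by decide

lemma pvT_step {m : Nat} (h : 2 ≤ m) :
    Nat.toDigits 2 m = Nat.toDigits 2 (m / 2) ++ [if m % 2 = 1 then '1' else '0'] := by
  have h2 := Nat.toDigits_of_base_le (b := 2) (n := m) (by norm_num) h
  rcases Nat.mod_two_eq_zero_or_one m with h0 | h1
  · rw [h2, h0]; simp; decide
  · rw [h2, h1]; simp; decide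

lemma pvT_ne_nil (m : Nat) : Nat.toDigits 2 m ≠ [] := by
  rcases Nat.lt_or_ge m 2 with h | h
  · interval_cases m
    · rw [pvT_zero]; simp
    · rw [pvT_one]; simp
  · rw [pvT_step h]; simp

lemma pvT_binary (m : Nat) : ∀ c ∈ Nat.toDigits 2 m, c = '0' ∨ c = '1' := by
  induction m using Nat.strong_induction_on with
  | _ m ih =>
    rcases Nat.lt_or_ge m 2 with h | h
    · interval_cases m
      · rw [pvT_zero]; simp
      · rw [pvT_one]; simp
    · rw [pvT_step h]
      intro c hc
      rcases List.mem_append.mp hc with hc | hc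
      · exact ih (m / 2) (by omega) c hc
      · simp at hc; subst hc; split <;> simp

lemma pvRv_reverse_toDigits (m : Nat) : pvRv (Nat.toDigits 2 m).reverse = m := by
  induction m using Nat.strong_induction_on with
  | _ m ih
  =>
  rcases Nat.lt_or_ge m 2 with h | h
  · interval_cases m
    · rw [pvT_zero]; simp [pvRv]
    · rw [pvT_one]; simp [pvRv]
  · rw [pvT_step h, List.reverse_append]
    have := ih (m / 2) (by omega)
    rcases Nat.mod_two_eq_zero_or_one m with h0 | h1
    · simp [h0, pvRv, this]; omega
    · simp [h1, pvRv, this]; omega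

lemma pvT_lt (m : Nat) : m < 2 ^ (Nat.toDigits 2 m).length := by
  induction m using Nat.strong_induction_on with
  | _ m ih
  =>
  rcases Nat.lt_or_ge m 2 with h | h
  · interval_cases m
    · rw [pvT_zero]; simp
    · rw [pvT_one]; simp
  · rw [pvT_step h]
    have := ih (m / 2) (by omega)
    simp only [List.length_append, List.length_singleton, pow_succ]
    omega

-- bit i of m, as the character at position i of the reversed digit string
lemma pvT_getElem_reverse (m i : Nat) (hi : i < (Nat.toDigits 2 m).reverse.length) :
    (Nat.toDigits 2 m).reverse[i] = (if m / 2 ^ i % 2 = 1 then '1' else '0') := by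
  induction m using Nat.strong_induction_on generalizing i with
  | _ m ih
  =>
  rcases Nat.lt_or_ge m 2 with h | h
  · interval_cases m
    · simp only [pvT_zero] at hi ⊢
      simp at hi; subst hi; simp
    · simp only [pvT_one] at hi ⊢
      simp at hi; subst hi; simp
  · simp only [pvT_step h, List.reverse_append] at hi ⊢
    cases i with
    | zero => simp [pow_zero]
    | succ j =>
      simp only [List.reverse_singleton, List.singleton_append, List.length_cons] at hi ⊢
      have hj : j < (Nat.toDigits 2 (m / 2)).reverse.length := by
        simpa using Nat.lt_of_succ_lt_succ hi
      simp only [List.getElem_cons_succ]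
      rw [ih (m / 2) (by omega) j hj]
      have : m / 2 ^ (j + 1) = m / 2 / 2 ^ j := by
        rw [pow_succ, Nat.div_div_eq_div_mul]; ring_nf
      rw [this]

-- ---- facts about pvLcb ----

lemma pvLcb_below (m : Nat) : ∀ i < pvLcb m, m / 2 ^ i % 2 = 1 := by
  induction m using Nat.strong_induction_on with
  | _ m ih
  =>
  intro i hi
  rw [pvLcb] at hi
  split at hi
  · omega
  · rename_i hodd
    cases i with
    | zero => simpa using (by omega : m % 2 = 1)
    | succ j =>
      have := ih (m / 2) (by omega) j (by omega)
      rw [pow_succ, Nat.mul_comm, ← Nat.div_div_eq_div_mul]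
      exact this

lemma pvLcb_at (m : Nat) : m / 2 ^ pvLcb m % 2 = 0 := by
  induction m using Nat.strong_induction_on with
  | _ m ih
  =>
  rw [pvLcb]
  split
  · simpa
  · rename_i hodd
    have := ih (m / 2) (by omega)
    rw [pow_succ, Nat.mul_comm, ← Nat.div_div_eq_div_mul]
    exact this

lemma pvLcb_le (m : Nat) : pvLcb m ≤ m := by
  induction m using Nat.strong_induction_on with
  | _ m ih
  =>
  rw [pvLcb]
  split
  · omega
  · have := ih (m / 2) (by omega)
    omega

-- ---- the scan loop computes pvLcb ----

lemma pvScanClear_eq (m : Nat) : ∀ (fuel p : Nat), pvLcb (m >>> p) ≤ fuel →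
    pvScanClear (m : Int) p fuel = p + pvLcb (m >>> p) := by
  intro fuel
  induction fuel with
  | zero =>
    intro p hp
    simp only [Nat.le_zero] at hp
    simp [pvScanClear, hp]
  | succ f ih =>
    intro p hp
    rw [pvScanClear]
    have hcast : (m : Int) >>> p = ((m >>> p : Nat) : Int) := rfl
    have hband : PySem.Int.band ((m >>> p : Nat) : Int) 1 = (((m >>> p) &&& 1 : Nat) : Int) := by
      exact_mod_cast PySem.Int.band_natCast (m >>> p) 1
    rw [hcast, hband, Nat.and_one_is_mod]
    by_cases hodd : (m >>> p) % 2 = 1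
    · rw [if_pos (by exact_mod_cast hodd)]
      have hl : pvLcb (m >>> p) = pvLcb (m >>> (p + 1)) + 1 := by
        rw [pvLcb]; simp [hodd, Nat.shiftRight_succ]
      rw [ih (p + 1) (by omega)]
      omega
    · rw [if_neg (by exact_mod_cast hodd)]
      have : pvLcb (m >>> p) = 0 := by rw [pvLcb]; simp [Nat.mod_two_ne_one.mp hodd]
      omega

lemma pvScanClear_zero (m : Nat) : pvScanClear (m : Int) 0 (m + 2) = pvLcb m := by
  have h := pvScanClear_eq m (m + 2) 0 (by simpa using Nat.le_add_right_of_le (pvLcb_le m))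
  simpa using h

-- ---- per-element lemmas ----

lemma pvStepB_eq (m : Nat) :
    pvStepB (m : Int) = (m : Int) + (if pvLcb m = 0 then 1 else (2 : Int) ^ (pvLcb m - 1)) := by
  simp only [pvStepB, Int.natAbs_natCast, pvScanClear_zero, Int.shiftLeft_eq]
  split
  · rename_i h; simp [h]
  · simp

-- the first '0' in the reversed digit string sits exactly at bit pvLcb m
lemma pvFirstZero_eq_lcb (m k : Nat) (hk : k < (Nat.toDigits 2 m).reverse.length)
    (h0 : (Nat.toDigits 2 m).reverse[k] = '0')
    (hmin : ∀ i, i < k → ∀ hi : i < (Nat.toDigits 2 m).reverse.length,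
      (Nat.toDigits 2 m).reverse[i] ≠ '0') : k = pvLcb m := by
  rcases Nat.lt_trichotomy k (pvLcb m) with h | h | h
  · exfalso
    have hb := pvLcb_below m k h
    rw [pvT_getElem_reverse m k hk, hb] at h0
    simp at h0
  · exact h
  · exfalso
    have hL : pvLcb m < (Nat.toDigits 2 m).reverse.length := by omega
    have := hmin (pvLcb m) h hL
    rw [pvT_getElem_reverse m (pvLcb m) hL, pvLcb_at m] at this
    simp at this

lemma pvStepA_eq (m : Nat) :
    pvStepA (m : Int) = (m : Int) + (if pvLcb m = 0 then 1 else (2 : Int) ^ (pvLcb m - 1)) := by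
  have hbin : PySem.List.slice (PySem.Int.toBinChars0b (m : Int)) (some 2) none
      = Nat.toDigits 2 m := by
    rw [PySem.List.slice_from _ (by norm_num)]
    have : ¬ ((m : Int) < 0) := Int.not_lt.mpr (Int.natCast_nonneg m)
    simp [PySem.Int.toBinChars0b, this]
  have hL1 : 1 ≤ (Nat.toDigits 2 m).length := by
    have := pvT_ne_nil m
    cases h : Nat.toDigits 2 m with
    | nil => exact absurd h this
    | cons a t => simp
  simp only [pvStepA, hbin, PySem.List.slice?_none_none_neg_one, Option.getD_some,
    PySem.List.len_eq]
  by_cases hin : PySem.Chars.isIn ['0'] (Nat.toDigits 2 m) = true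
  · rw [if_pos hin]
    have hmemT : '0' ∈ Nat.toDigits 2 m :=
      (List.singleton_infix_iff _ _).mp ((PySem.Chars.isIn_iff_infix _ _).mp hin)
    have hmemR : '0' ∈ (Nat.toDigits 2 m).reverse := List.mem_reverse.mpr hmemT
    have h0le : 0 ≤ PySem.Chars.find (Nat.toDigits 2 m).reverse ['0'] :=
      (PySem.Chars.find_nonneg_iff _ _).mpr ((List.singleton_infix_iff _ _).mpr hmemR)
    obtain ⟨hpre, hmin'⟩ := PySem.Chars.find_spec h0le
    have hfr : PySem.Chars.find (Nat.toDigits 2 m).reverse ['0']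
        = ((PySem.Chars.find (Nat.toDigits 2 m).reverse ['0']).toNat : Int) :=
      (Int.toNat_of_nonneg h0le).symm
    set k := (PySem.Chars.find (Nat.toDigits 2 m).reverse ['0']).toNat with hkdef
    obtain ⟨t, ht⟩ := hpre
    have hk? : (Nat.toDigits 2 m).reverse[k]? = some '0' := by
      rw [← List.head?_drop, ← ht]; rfl
    obtain ⟨hkL, hk0⟩ := List.getElem?_eq_some_iff.mp hk?
    have hmin : ∀ i, i < k → ∀ hi : i < (Nat.toDigits 2 m).reverse.length,
        (Nat.toDigits 2 m).reverse[i] ≠ '0' := by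
      intro i hik hi heq
      exact hmin' i hik ⟨(Nat.toDigits 2 m).reverse.drop (i + 1), by
        rw [← heq]; simpa using (List.drop_eq_getElem_cons hi).symm⟩
    have hklcb : k = pvLcb m := pvFirstZero_eq_lcb m k hkL hk0 hmin
    have hkLen : k < (Nat.toDigits 2 m).length := by simpa using hkL
    rcases Nat.eq_zero_or_pos k with hk | hk
    · -- zero_pos = len - 1 : no lower bit to clear; result is m + 1
      rw [hfr, if_neg (by omega), PySem.List.slice_to _ (by omega), pvIntBase2_eq_pvRv]
      have h1 : ((((Nat.toDigits 2 m).length : Int) - (k : Int) - 1)).toNat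
          = (Nat.toDigits 2 m).length - 1 := by omega
      rw [h1, List.reverse_append, List.reverse_take]
      have h2 : (Nat.toDigits 2 m).length - ((Nat.toDigits 2 m).length - 1) = 1 := by omega
      rw [h2]
      have hdec := List.drop_eq_getElem_cons (l := (Nat.toDigits 2 m).reverse)
        (i := 0) (by omega)
      simp only [List.drop_zero, Nat.zero_add] at hdec
      rw [show (Nat.toDigits 2 m).reverse[0] = '0' from by
        rw [← hk0]; congr 1; omega] at hdec
      have hm : (m : Int) = 2 * pvRv ((Nat.toDigits 2 m).reverse.drop 1) := by
        conv_lhs => rw [← pvRv_reverse_toDigits m]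
        rw [hdec]; simp [pvRv]
      rw [← hklcb, hk, if_pos rfl]
      simp only [List.reverse_singleton, List.singleton_append, pvRv, if_true]
      omega
    · -- zero_pos < len - 1 : set bit k, clear bit k-1; result is m + 2^(k-1)
      rw [hfr, if_pos (by omega), PySem.List.slice_to _ (by omega),
        PySem.List.slice_from _ (by omega), pvIntBase2_eq_pvRv]
      have h1 : ((((Nat.toDigits 2 m).length : Int) - (k : Int) - 1)).toNat
          = (Nat.toDigits 2 m).length - 1 - k := by omega
      have h2 : ((((Nat.toDigits 2 m).length : Int) - (k : Int) - 1 + 2)).toNat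
          = (Nat.toDigits 2 m).length + 1 - k := by omega
      rw [h1, h2, ← hklcb, if_neg (by omega)]
      have e1 : (Nat.toDigits 2 m).length - ((Nat.toDigits 2 m).length - 1 - k) = k + 1 := by
        omega
      have e2 : (Nat.toDigits 2 m).length - ((Nat.toDigits 2 m).length + 1 - k) = k - 1 := by
        omega
      rw [List.reverse_append, List.reverse_append, List.reverse_cons, List.reverse_take, e1,
        List.reverse_drop, e2, List.reverse_singleton]
      have hk1L : k - 1 < (Nat.toDigits 2 m).reverse.length := by omega
      have hd2 : List.drop k ((Nat.toDigits 2 m).reverse)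
          = '0' :: List.drop (k + 1) ((Nat.toDigits 2 m).reverse) := by
        rw [List.drop_eq_getElem_cons hkL, hk0]
      have hr1 : (Nat.toDigits 2 m).reverse[k - 1] = '1' := by
        have hmem : (Nat.toDigits 2 m).reverse[k - 1] ∈ Nat.toDigits 2 m :=
          List.mem_reverse.mp (List.getElem_mem hk1L)
        rcases pvT_binary m _ hmem with h | h
        · exact absurd h (hmin (k - 1) (by omega) hk1L)
        · exact h
      have hd1 : List.drop (k - 1) ((Nat.toDigits 2 m).reverse)
          = '1' :: '0' :: List.drop (k + 1) ((Nat.toDigits 2 m).reverse) := by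
        rw [List.drop_eq_getElem_cons hk1L, hr1, show k - 1 + 1 = k from by omega, hd2]
      have hm : (m : Int) = pvRv (List.take (k - 1) ((Nat.toDigits 2 m).reverse))
          + 2 ^ (k - 1) * (1 + 2 * (0 + 2 * pvRv (List.drop (k + 1) ((Nat.toDigits 2 m).reverse)))) := by
        conv_lhs => rw [← pvRv_reverse_toDigits m,
          ← List.take_append_drop (k - 1) ((Nat.toDigits 2 m).reverse), hd1]
        rw [pvRv_append, List.length_take,
          Nat.min_eq_left (by omega : k - 1 ≤ (Nat.toDigits 2 m).reverse.length)]
        simp only [pvRv]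
        norm_num
        decide
      rw [List.append_assoc, List.singleton_append, pvRv_append, List.length_take,
        Nat.min_eq_left (by omega : k - 1 ≤ (Nat.toDigits 2 m).reverse.length), hm,
        show pvRv ('0' :: (['1'] ++ List.drop (k + 1) (Nat.toDigits 2 m).reverse))
            = 2 + 4 * pvRv (List.drop (k + 1) (Nat.toDigits 2 m).reverse) from by
          simp [pvRv]; ring]
      ring
  · rw [if_neg hin]
    have hnm : '0' ∉ Nat.toDigits 2 m := by
      intro hmem
      exact hin ((PySem.Chars.isIn_iff_infix _ _).mpr ((List.singleton_infix_iff _ _).mpr hmem))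
    have hall : ∀ c ∈ Nat.toDigits 2 m, c = '1' := by
      intro c hc
      rcases pvT_binary m c hc with h | h
      · exact absurd (h ▸ hc) hnm
      · exact h
    have hrep : Nat.toDigits 2 m = List.replicate (Nat.toDigits 2 m).length '1' :=
      List.eq_replicate_of_mem hall
    have hlcb : pvLcb m = (Nat.toDigits 2 m).length := by
      rcases Nat.lt_trichotomy (pvLcb m) (Nat.toDigits 2 m).length with h | h | h
      · exfalso
        have hiL : pvLcb m < (Nat.toDigits 2 m).reverse.length := by simpa using h
        have hz := pvT_getElem_reverse m (pvLcb m) hiL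
        rw [pvLcb_at m, if_neg (by omega : ¬ (0 : Nat) = 1)] at hz
        exact hnm (List.mem_reverse.mp (hz ▸ List.getElem_mem hiL))
      · exact h
      · exfalso
        have hb := pvLcb_below m (Nat.toDigits 2 m).length h
        have hlt := pvT_lt m
        have hz : m / 2 ^ (Nat.toDigits 2 m).length = 0 := Nat.div_eq_of_lt hlt
        omega
    have hm : (m : Int) = 2 ^ (Nat.toDigits 2 m).length - 1 := by
      conv_lhs => rw [← pvRv_reverse_toDigits m, hrep, List.reverse_replicate,
        pvRv_replicate_one]
    rw [PySem.List.slice_from _ (by norm_num), pvIntBase2_eq_pvRv]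
    have hd : List.drop ((1 : Int)).toNat (Nat.toDigits 2 m)
        = List.replicate ((Nat.toDigits 2 m).length - 1) '1' := by
      conv_lhs => rw [hrep]
      rw [List.drop_replicate]
      norm_num
    rw [hd]
    simp only [List.reverse_cons, List.reverse_replicate, List.append_assoc,
      List.singleton_append]
    rw [pvRv_append, pvRv_replicate_one, List.length_replicate, hm, hlcb,
      if_neg (by omega : ¬ (Nat.toDigits 2 m).length = 0)]
    have hp : ((2 : Int)) ^ (Nat.toDigits 2 m).length = 2 ^ ((Nat.toDigits 2 m).length - 1) * 2 := by
      rw [← pow_succ]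
      congr 1
      omega
    rw [hp]
    simp [pvRv]
    ring

lemma pvStep_eq (n : Int) (h : 0 ≤ n) : pvStepA n = pvStepB n := by
  obtain ⟨m, rfl⟩ : ∃ m : Nat, n = (m : Int) := ⟨n.toNat, (Int.toNat_of_nonneg h).symm⟩
  rw [pvStepA_eq, pvStepB_eq]

-- ===== VERDICT (by name: the statement is the Claim_ definition above) =====
theorem solution_spec : Claim_equal_solution := by
  intro numbers _hdom hpre
  unfold Spec_solution solution solution_alt
  rw [PySem.List.foldl_append_singleton_eq_map, PySem.List.foldl_append_singleton_eq_map]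
  simp only [List.nil_append]
  exact List.map_eq_map_iff.mpr (fun n hn => pvStep_eq n (hpre n hn))
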